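-- pv_equiv track=rewrite | github.com/YasserRa-fat/Pre-Coded | api_generator/create_api/ai_generator.py | group_related_files
-- ===== SOURCE A (Python) =====
-- from typing import Dict, List, Optional, Tuple
--
-- def group_related_files(files_data: Dict[str, Dict]) -> List[Dict[str, Dict]]:
--     """Group related files together based on their dependencies and types"""
--     groups = []
--     remaining_files = files_data.copy()
--
--     # Helper function to get file type
--     def get_file_category(file_path: str) -> str:
--         if file_path.endswith('.html'):
--             return 'template'
--         elif '/static/' in file_path or file_path.startswith('static/'):
--             return 'static'
--         elif 'models.py' in file_path:
--             return 'model'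
--         elif 'views.py' in file_path:
--             return 'view'
--         elif 'forms.py' in file_path:
--             return 'form'
--         elif 'urls.py' in file_path:
--             return 'url'
--         return 'other'
--
--     # First group: Models (they should be processed first as other files may depend on them)
--     model_files = {k: v for k, v in remaining_files.items() if get_file_category(k) == 'model'}
--     if model_files:
--         groups.append(model_files)
--         for k in model_files:
--             remaining_files.pop(k)
--
--     # Second group: Forms (they often depend on models)
--     form_files = {k: v for k, v in remaining_files.items() if get_file_category(k) == 'form'}
--     if form_files:
--         groups.append(form_files)
--         for k in form_files:
--             remaining_files.pop(k)
--
--     # Third group: Views (they may depend on both models and forms)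
--     view_files = {k: v for k, v in remaining_files.items() if get_file_category(k) == 'view'}
--     if view_files:
--         groups.append(view_files)
--         for k in view_files:
--             remaining_files.pop(k)
--
--     # Fourth group: Templates (they depend on views)
--     template_files = {k: v for k, v in remaining_files.items() if get_file_category(k) == 'template'}
--     if template_files:
--         groups.append(template_files)
--         for k in template_files:
--             remaining_files.pop(k)
--
--     # Fifth group: Static files
--     static_files = {k: v for k, v in remaining_files.items() if get_file_category(k) == 'static'}
--     if static_files:
--         groups.append(static_files)
--         for k in static_files:
--             remaining_files.pop(k)
--
--     # Last group: Any remaining files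
--     if remaining_files:
--         groups.append(remaining_files)
--
--     return groups
-- ===== SOURCE B (Python) =====
-- def group_related_files(files_data):
--     """Group related files into ordered category buckets in a single pass."""
--     def category(path):
--         if path.endswith('.html'):
--             return 'template'
--         if '/static/' in path or path.startswith('static/'):
--             return 'static'
--         for marker, cat in (('models.py', 'model'), ('views.py', 'view'), ('forms.py', 'form')):
--             if marker in path:
--                 return cat
--         return 'rest'   # urls.py and everything else share the last bucket
--
--     buckets = {c: {} for c in ('model', 'form', 'view', 'template', 'static', 'rest')}
--     for k, v in files_data.items():
--         buckets[category(k)][k] = v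
--     return [b for b in buckets.values() if b]
-- ===== Notes on version B (the rewrite author's own statement) =====
-- stated objective: simpler
-- what changed: Replaces six filter-and-pop passes over a shrinking dict by a single pass that buckets each file once into fixed-priority categories (routing url and other files into one shared last bucket) and then emits the non-empty buckets in order.
import Mathlib
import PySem

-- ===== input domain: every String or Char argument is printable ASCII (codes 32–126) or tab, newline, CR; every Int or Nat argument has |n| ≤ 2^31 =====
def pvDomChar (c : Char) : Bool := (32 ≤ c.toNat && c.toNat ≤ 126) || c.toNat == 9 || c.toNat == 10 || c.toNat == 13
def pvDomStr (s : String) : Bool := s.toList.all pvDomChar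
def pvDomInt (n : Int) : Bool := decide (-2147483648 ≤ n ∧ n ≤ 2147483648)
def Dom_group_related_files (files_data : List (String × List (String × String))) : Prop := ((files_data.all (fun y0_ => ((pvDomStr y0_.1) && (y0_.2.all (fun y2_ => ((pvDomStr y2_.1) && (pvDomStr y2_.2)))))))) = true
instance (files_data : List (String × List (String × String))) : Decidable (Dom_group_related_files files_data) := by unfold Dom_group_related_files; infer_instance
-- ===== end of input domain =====

-- B replaces A's six filter-and-pop passes over a shrinking dict by one bucketing pass
-- followed by emitting the non-empty buckets in fixed order (objective: simpler).

-- ===== PORT A =====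
-- get_file_category, transliterated branch for branch
def getFileCategory (file_path : String) : String :=
  if PySem.Str.endswith file_path ".html" then "template"
  else if PySem.Str.isIn "/static/" file_path || PySem.Str.startswith file_path "static/" then "static"
  else if PySem.Str.isIn "models.py" file_path then "model"
  else if PySem.Str.isIn "views.py" file_path then "view"
  else if PySem.Str.isIn "forms.py" file_path then "form"
  else if PySem.Str.isIn "urls.py" file_path then "url"
  else "other"

-- 'for k in picked: remaining_files.pop(k)' — pop removes the (first) entry with that key
def popKeys (picked : List (String × List (String × String)))
    (remaining : List (String × List (String × String))) : List (String × List (String × String)) :=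
  picked.foldl (fun r kv => r.eraseP (fun q => q.1 == kv.1)) remaining

def group_related_files (files_data : List (String × List (String × String))) : List (List (String × List (String × String))) :=
  let groups0 : List (List (String × List (String × String))) := []
  let remaining0 := files_data
  let model_files := remaining0.filter (fun kv => getFileCategory kv.1 == "model")
  let groups1 := if model_files.isEmpty then groups0 else groups0 ++ [model_files]
  let remaining1 := popKeys model_files remaining0
  let form_files := remaining1.filter (fun kv => getFileCategory kv.1 == "form")
  let groups2 := if form_files.isEmpty then groups1 else groups1 ++ [form_files]
  let remaining2 := popKeys form_files remaining1
  let view_files := remaining2.filter (fun kv => getFileCategory kv.1 == "view")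
  let groups3 := if view_files.isEmpty then groups2 else groups2 ++ [view_files]
  let remaining3 := popKeys view_files remaining2
  let template_files := remaining3.filter (fun kv => getFileCategory kv.1 == "template")
  let groups4 := if template_files.isEmpty then groups3 else groups3 ++ [template_files]
  let remaining4 := popKeys template_files remaining3
  let static_files := remaining4.filter (fun kv => getFileCategory kv.1 == "static")
  let groups5 := if static_files.isEmpty then groups4 else groups4 ++ [static_files]
  let remaining5 := popKeys static_files remaining4
  if remaining5.isEmpty then groups5 else groups5 ++ [remaining5]

-- ===== PORT B =====
-- the marker loop of B's category helper
def ruleScan (rules : List (String × String)) (path : String) : String :=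
  match rules with
  | [] => "rest"
  | (marker, cat) :: rs => if PySem.Str.isIn marker path then cat else ruleScan rs path

def categoryAlt (path : String) : String :=
  if PySem.Str.endswith path ".html" then "template"
  else if PySem.Str.isIn "/static/" path || PySem.Str.startswith path "static/" then "static"
  else ruleScan [("models.py", "model"), ("views.py", "view"), ("forms.py", "form")] path

-- buckets as a 6-tuple in the fixed order model, form, view, template, static, rest
def bucketStep (b : List (String × List (String × String)) × List (String × List (String × String)) × List (String × List (String × String)) × List (String × List (String × String)) × List (String × List (String × String)) × List (String × List (String × String)))
    (kv : String × List (String × String)) :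
    List (String × List (String × String)) × List (String × List (String × String)) × List (String × List (String × String)) × List (String × List (String × String)) × List (String × List (String × String)) × List (String × List (String × String)) :=
  let c := categoryAlt kv.1
  if c == "model" then (b.1 ++ [kv], b.2.1, b.2.2.1, b.2.2.2.1, b.2.2.2.2.1, b.2.2.2.2.2)
  else if c == "form" then (b.1, b.2.1 ++ [kv], b.2.2.1, b.2.2.2.1, b.2.2.2.2.1, b.2.2.2.2.2)
  else if c == "view" then (b.1, b.2.1, b.2.2.1 ++ [kv], b.2.2.2.1, b.2.2.2.2.1, b.2.2.2.2.2)
  else if c == "template" then (b.1, b.2.1, b.2.2.1, b.2.2.2.1 ++ [kv], b.2.2.2.2.1, b.2.2.2.2.2)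
  else if c == "static" then (b.1, b.2.1, b.2.2.1, b.2.2.2.1, b.2.2.2.2.1 ++ [kv], b.2.2.2.2.2)
  else (b.1, b.2.1, b.2.2.1, b.2.2.2.1, b.2.2.2.2.1, b.2.2.2.2.2 ++ [kv])

def group_related_files_alt (files_data : List (String × List (String × String))) : List (List (String × List (String × String))) :=
  let b := files_data.foldl bucketStep ([], [], [], [], [], [])
  ([b.1, b.2.1, b.2.2.1, b.2.2.2.1, b.2.2.2.2.1, b.2.2.2.2.2]).filter (fun g => !g.isEmpty)

-- ===== PRECONDITION & SPEC =====
def Spec_group_related_files (files_data : List (String × List (String × String))) (out : List (List (String × List (String × String)))) : Prop := out = group_related_files_alt files_data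
instance (files_data : List (String × List (String × String))) (out : List (List (String × List (String × String)))) : Decidable (Spec_group_related_files files_data out) := by unfold Spec_group_related_files; infer_instance

-- ===== CLAIM (what is proved, stated in full; the proofs are below) =====
def Claim_equal_group_related_files : Prop := ∀ (files_data : List (String × List (String × String))), Dom_group_related_files files_data → Spec_group_related_files files_data (group_related_files files_data)

-- ===== LEMMAS AND PROOFS =====

-- the seven values A's category helper can return
theorem getFileCategory_mem (p : String) :
    getFileCategory p = "template" ∨ getFileCategory p = "static" ∨ getFileCategory p = "model" ∨
    getFileCategory p = "view" ∨ getFileCategory p = "form" ∨ getFileCategory p = "url" ∨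
    getFileCategory p = "other" := by
  simp only [getFileCategory]
  split_ifs <;> simp

-- B's category is A's category with 'url' and 'other' merged into 'rest'
theorem categoryAlt_eq (p : String) :
    categoryAlt p = if getFileCategory p == "url" || getFileCategory p == "other" then "rest" else getFileCategory p := by
  simp only [categoryAlt, getFileCategory, ruleScan]
  split_ifs <;> simp_all

theorem categoryAlt_mem (p : String) :
    categoryAlt p = "model" ∨ categoryAlt p = "form" ∨ categoryAlt p = "view" ∨
    categoryAlt p = "template" ∨ categoryAlt p = "static" ∨ categoryAlt p = "rest" := by
  rw [categoryAlt_eq]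
  rcases getFileCategory_mem p with h|h|h|h|h|h|h <;> rw [h] <;> simp

-- popping keys none of which can occur at the head leaves the head in place
theorem popKeys_cons (p : String × List (String × String) → Bool)
    (hp : ∀ x y, x.1 = y.1 → p x = p y)
    (ks : List (String × List (String × String))) (x : String × List (String × String))
    (r : List (String × List (String × String)))
    (hk : ∀ kv ∈ ks, p kv = true) (hx : p x = false) :
    popKeys ks (x :: r) = x :: popKeys ks r := by
  induction ks generalizing r with
  | nil => rfl
  | cons k ks ih =>
    have hne : (x.1 == k.1) = false := by
      cases hb : x.1 == k.1
      · rfl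
      · have := hp x k (by simpa using hb)
        rw [hx, hk k List.mem_cons_self] at this
        exact absurd this (by simp)
    simp only [popKeys, List.foldl_cons]
    rw [List.eraseP_cons_of_neg (by simpa using hne)]
    exact ih _ (fun kv hkv => hk kv (List.mem_cons_of_mem _ hkv))

-- A's filter-then-pop pass equals one filter by the negated (key-determined) predicate
theorem popKeys_filter (p : String × List (String × String) → Bool)
    (hp : ∀ x y, x.1 = y.1 → p x = p y)
    (l : List (String × List (String × String))) :
    popKeys (l.filter p) l = l.filter (fun x => !p x) := by
  induction l with
  | nil => rfl
  | cons x xs ih =>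
    cases hx : p x
    · rw [List.filter_cons_of_neg (by simp [hx]), List.filter_cons_of_pos (by simp [hx]),
        popKeys_cons p hp _ x xs (fun kv hkv => (List.mem_filter.mp hkv).2) hx, ih]
    · rw [List.filter_cons_of_pos (by simp [hx]), List.filter_cons_of_neg (by simp [hx])]
      simp only [popKeys, List.foldl_cons]
      rw [List.eraseP_cons_of_pos (by simp)]
      exact ih

-- B's single pass fills each bucket with the corresponding filter of the input
theorem bucket_foldl (fd : List (String × List (String × String)))
    (a b c d e f : List (String × List (String × String))) :
    fd.foldl bucketStep (a, b, c, d, e, f)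
      = (a ++ fd.filter (fun kv => categoryAlt kv.1 == "model"),
         b ++ fd.filter (fun kv => categoryAlt kv.1 == "form"),
         c ++ fd.filter (fun kv => categoryAlt kv.1 == "view"),
         d ++ fd.filter (fun kv => categoryAlt kv.1 == "template"),
         e ++ fd.filter (fun kv => categoryAlt kv.1 == "static"),
         f ++ fd.filter (fun kv => categoryAlt kv.1 == "rest")) := by
  induction fd generalizing a b c d e f with
  | nil => simp
  | cons kv tl ih =>
    rcases categoryAlt_mem kv.1 with h|h|h|h|h|h <;>
      simp [bucketStep, h, ih]

-- A's successive groups, taken from the shrinking remainder, are plain filters of the input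
theorem groups_eq (fd : List (String × List (String × String))) :
    fd.filter (fun kv => getFileCategory kv.1 == "model") = fd.filter (fun kv => categoryAlt kv.1 == "model")
  ∧ (fd.filter (fun kv => !(getFileCategory kv.1 == "model"))).filter (fun kv => getFileCategory kv.1 == "form")
      = fd.filter (fun kv => categoryAlt kv.1 == "form")
  ∧ ((fd.filter (fun kv => !(getFileCategory kv.1 == "model"))).filter (fun kv => !(getFileCategory kv.1 == "form"))).filter (fun kv => getFileCategory kv.1 == "view")
      = fd.filter (fun kv => categoryAlt kv.1 == "view")
  ∧ (((fd.filter (fun kv => !(getFileCategory kv.1 == "model"))).filter (fun kv => !(getFileCategory kv.1 == "form"))).filter (fun kv => !(getFileCategory kv.1 == "view"))).filter (fun kv => getFileCategory kv.1 == "template")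
      = fd.filter (fun kv => categoryAlt kv.1 == "template")
  ∧ ((((fd.filter (fun kv => !(getFileCategory kv.1 == "model"))).filter (fun kv => !(getFileCategory kv.1 == "form"))).filter (fun kv => !(getFileCategory kv.1 == "view"))).filter (fun kv => !(getFileCategory kv.1 == "template"))).filter (fun kv => getFileCategory kv.1 == "static")
      = fd.filter (fun kv => categoryAlt kv.1 == "static")
  ∧ (((((fd.filter (fun kv => !(getFileCategory kv.1 == "model"))).filter (fun kv => !(getFileCategory kv.1 == "form"))).filter (fun kv => !(getFileCategory kv.1 == "view"))).filter (fun kv => !(getFileCategory kv.1 == "template"))).filter (fun kv => !(getFileCategory kv.1 == "static")))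
      = fd.filter (fun kv => categoryAlt kv.1 == "rest") := by
  refine ⟨?_, ?_, ?_, ?_, ?_, ?_⟩ <;>
  · try simp only [List.filter_filter]
    apply List.filter_congr
    intro a _
    rcases getFileCategory_mem a.1 with h|h|h|h|h|h|h <;> simp [categoryAlt_eq, h]

-- ===== VERDICT (by name: the statement is the Claim_ definition above) =====
theorem group_related_files_spec : Claim_equal_group_related_files := by
  intro fd _
  show group_related_files fd = group_related_files_alt fd
  obtain ⟨e1, e2, e3, e4, e5, e6⟩ := groups_eq fd
  simp only [group_related_files, group_related_files_alt, bucket_foldl, List.nil_append]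
  rw [popKeys_filter (fun kv => getFileCategory kv.1 == "model") (fun x y h => by simp [h]),
    popKeys_filter (fun kv => getFileCategory kv.1 == "form") (fun x y h => by simp [h]),
    popKeys_filter (fun kv => getFileCategory kv.1 == "view") (fun x y h => by simp [h]),
    popKeys_filter (fun kv => getFileCategory kv.1 == "template") (fun x y h => by simp [h]),
    popKeys_filter (fun kv => getFileCategory kv.1 == "static") (fun x y h => by simp [h]),
    e1, e2, e3, e4, e5, e6]
  cases h1 : (fd.filter (fun kv => categoryAlt kv.1 == "model")).isEmpty <;>
  cases h2 : (fd.filter (fun kv => categoryAlt kv.1 == "form")).isEmpty <;>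
  cases h3 : (fd.filter (fun kv => categoryAlt kv.1 == "view")).isEmpty <;>
  cases h4 : (fd.filter (fun kv => categoryAlt kv.1 == "template")).isEmpty <;>
  cases h5 : (fd.filter (fun kv => categoryAlt kv.1 == "static")).isEmpty <;>
  cases h6 : (fd.filter (fun kv => categoryAlt kv.1 == "rest")).isEmpty <;>
  simp [h1, h2, h3, h4, h5, h6]
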